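-- pv_equiv track=rewrite | github.com/staream/trainproject | 1학기 웹파이썬/토론 퀴즈 중복학생제거.py | get_unique_students
-- ===== SOURCE A (Python) =====
-- def get_unique_students(a:tuple):
--     setting_name=set()
--     total_num=0
--     for i in a:
--         s=i.upper()#add라는 메소드를 만든 이유를 생각해보기
--         setting_name.add(s) ###setting_name=set(s) 내가 저지른 오류 {s1},{s2}등의 형식으로 만든 거임
--         # #upper 같은 것이 return인지 아닌지에 대해 생각하고 답을 쓰기
--     for j in setting_name:
--         total_num+=1
--     return total_num
-- ===== SOURCE B (Python) =====
-- def get_unique_students(a: tuple):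
--     names = sorted(x.upper() for x in a)
--     count = 0
--     prev = None
--     for n in names:
--         if n != prev:
--             count += 1
--         prev = n
--     return count
-- ===== Notes on version B (the rewrite author's own statement) =====
-- stated objective: alternative
-- what changed: Replaces hash-set deduplication (build a set, then count its elements) by sort-then-scan: sort the uppercased names and count adjacency changes in one pass.
import Mathlib
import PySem

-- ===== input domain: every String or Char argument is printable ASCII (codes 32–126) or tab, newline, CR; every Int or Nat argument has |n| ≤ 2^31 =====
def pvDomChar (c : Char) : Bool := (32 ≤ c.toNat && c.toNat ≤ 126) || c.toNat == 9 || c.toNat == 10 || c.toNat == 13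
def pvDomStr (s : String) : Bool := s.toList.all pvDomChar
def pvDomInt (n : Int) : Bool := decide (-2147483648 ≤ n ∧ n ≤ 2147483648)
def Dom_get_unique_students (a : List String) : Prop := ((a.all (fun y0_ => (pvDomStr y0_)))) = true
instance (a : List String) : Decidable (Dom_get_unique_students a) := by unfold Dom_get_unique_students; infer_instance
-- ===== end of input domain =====

-- B replaces A's hash-set deduplication with sort-then-adjacent-scan counting; alternative decomposition, same result.


-- ===== PORT A =====
def get_unique_students (a : List String) : Int :=
  let setting_name : PySem.Set String :=
    a.foldl (fun s i => PySem.Set.add s (PySem.Str.upper i)) PySem.Set.empty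
  setting_name.foldl (fun total_num _ => total_num + 1) (0 : Int)

-- ===== PORT B =====
def get_unique_students_alt (a : List String) : Int :=
  let names := PySem.List.sorted (a.map (fun x => PySem.Str.upper x)) (fun x => x) false
  (names.foldl
    (fun (st : Int × Option String) n =>
      ((if some n ≠ st.2 then st.1 + 1 else st.1), some n))
    ((0 : Int), (none : Option String))).1

-- ===== PRECONDITION & SPEC =====
def Spec_get_unique_students (a : List String) (out : Int) : Prop := out = get_unique_students_alt a
instance (a : List String) (out : Int) : Decidable (Spec_get_unique_students a out) := by unfold Spec_get_unique_students; infer_instance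

-- ===== CLAIM (what is proved, stated in full; the proofs are below) =====
def Claim_equal_get_unique_students : Prop := ∀ (a : List String), Dom_get_unique_students a → Spec_get_unique_students a (get_unique_students a)

-- ===== LEMMAS AND PROOFS =====

-- inserting x and erasing x change a Finset's card by exactly one
theorem card_insert_erase {α : Type} [DecidableEq α] (s : Finset α) (x : α) :
    (insert x s).card = (s.erase x).card + 1 := by
  have h := Finset.card_erase_add_one (s := insert x s) (Finset.mem_insert_self x s)
  rw [Finset.erase_insert_eq_erase] at h
  omega

-- A's two loops compute the number of distinct elements of the uppercased list.
theorem portA_eq_card (a : List String) :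
    get_unique_students a = ((a.map (fun x => PySem.Str.upper x)).toFinset.card : Int) := by
  unfold get_unique_students
  rw [← PySem.Set.update_map_eq_foldl_add, PySem.Set.update_empty]
  rw [PySem.List.foldl_add (g := fun _ => (1 : Int)), PySem.List.sum_map_const_int]
  have hnd := PySem.Set.nodup_ofList (xs := a.map (fun x => PySem.Str.upper x))
  have hfin : (PySem.Set.ofList (a.map (fun x => PySem.Str.upper x))).toFinset
      = (a.map (fun x => PySem.Str.upper x)).toFinset := by
    apply Finset.ext
    intro x
    simp [PySem.Set.mem_ofList]
  rw [← List.toFinset_card_of_nodup hnd, hfin]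
  ring

-- B's scan invariant: with previous value p below every element of a ≤-sorted list l,
-- the scan adds the number of distinct elements of l other than p.
theorem scan_invariant (l : List String) (p : String) (c : Int)
    (hl : l.Pairwise (· ≤ ·)) (hp : ∀ x ∈ l, p ≤ x) :
    (l.foldl
      (fun (st : Int × Option String) n =>
        ((if some n ≠ st.2 then st.1 + 1 else st.1), some n))
      (c, some p)).1 = c + ((l.toFinset.erase p).card : Int) := by
  induction l generalizing p c with
  | nil => simp
  | cons x xs ih =>
    rw [List.pairwise_cons] at hl
    obtain ⟨hx, hxs⟩ := hl
    by_cases hxp : x = p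
    · subst hxp
      simp only [List.foldl_cons]
      rw [if_neg (by simp)]
      rw [ih x c hxs hx]
      congr 2
      rw [List.toFinset_cons, Finset.erase_insert_eq_erase]
    · have hpx : p < x := lt_of_le_of_ne (hp x (by simp)) (Ne.symm hxp)
      have hpnot : p ∉ xs.toFinset := by
        simp only [List.mem_toFinset]
        intro hmem
        exact absurd (lt_of_lt_of_le hpx (hx p hmem)) (lt_irrefl p)
      simp only [List.foldl_cons]
      rw [if_pos (by simp [hxp])]
      rw [ih x (c + 1) hxs hx]
      have herase : ((x :: xs).toFinset.erase p) = insert x xs.toFinset := by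
        rw [List.toFinset_cons]
        apply Finset.erase_eq_of_notMem
        simp only [Finset.mem_insert, not_or]
        exact ⟨Ne.symm hxp, fun h => hpnot h⟩
      rw [herase, card_insert_erase]
      push_cast
      ring

theorem portB_eq_card (a : List String) :
    get_unique_students_alt a = ((a.map (fun x => PySem.Str.upper x)).toFinset.card : Int) := by
  unfold get_unique_students_alt
  have hperm := PySem.List.sorted_perm (a.map (fun x => PySem.Str.upper x)) (fun x => x) false
  have hfin : (PySem.List.sorted (a.map (fun x => PySem.Str.upper x)) (fun x => x) false).toFinset
      = (a.map (fun x => PySem.Str.upper x)).toFinset := by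
    apply Finset.ext
    intro y
    simp only [List.mem_toFinset]
    exact hperm.mem_iff
  have hpw := PySem.List.sorted_pairwise (a.map (fun x => PySem.Str.upper x)) (fun x => x)
  rcases hsort : PySem.List.sorted (a.map (fun x => PySem.Str.upper x)) (fun x => x) false with
    _ | ⟨x, xs⟩
  · rw [hsort] at hfin
    simp [← hfin]
  · rw [hsort] at hfin hpw
    rw [List.pairwise_cons] at hpw
    simp only [List.foldl_cons]
    rw [if_pos (by simp)]
    rw [scan_invariant xs x ((0 : Int) + 1) hpw.2 (fun y hy => hpw.1 y hy)]
    rw [← hfin, List.toFinset_cons, card_insert_erase]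
    push_cast
    ring

-- ===== VERDICT (by name: the statement is the Claim_ definition above) =====
theorem get_unique_students_spec : Claim_equal_get_unique_students := by
  intro a _
  unfold Spec_get_unique_students
  rw [portA_eq_card, portB_eq_card]
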